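-- pv_equiv track=rewrite | github.com/alessandro-sanna/oblivion | OblivionSource/PostProcessingPhase/post_processing.py | __filter_commands
-- ===== SOURCE A (Python) =====
-- def __filter_commands(shell_commands):
--     filtered = []
--     if len(shell_commands):
--         shell_commands = list(shell_commands)
--         shell_commands.sort()
--         for index in range(len(shell_commands) - 1):
--             if not shell_commands[index + 1].startswith(shell_commands[index]):
--                 filtered += [shell_commands[index]]
--         filtered += [shell_commands[-1]]
--     return set(filtered)
-- ===== SOURCE B (Python) =====
-- def __filter_commands(shell_commands):
--     # Keep exactly the distinct commands that are not a proper prefix of any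
--     # other distinct command.
--     commands = sorted(set(shell_commands))
--     return {c for c in commands
--             if not any(d != c and d.startswith(c) for d in commands)}
-- ===== Notes on version B (the rewrite author's own statement) =====
-- stated objective: simpler
-- what changed: B replaces A's sort-then-adjacent-neighbour pass over the duplicated list with a direct set comprehension over the distinct commands that keeps a command iff it is not a proper prefix of any other distinct command.
import Mathlib
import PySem

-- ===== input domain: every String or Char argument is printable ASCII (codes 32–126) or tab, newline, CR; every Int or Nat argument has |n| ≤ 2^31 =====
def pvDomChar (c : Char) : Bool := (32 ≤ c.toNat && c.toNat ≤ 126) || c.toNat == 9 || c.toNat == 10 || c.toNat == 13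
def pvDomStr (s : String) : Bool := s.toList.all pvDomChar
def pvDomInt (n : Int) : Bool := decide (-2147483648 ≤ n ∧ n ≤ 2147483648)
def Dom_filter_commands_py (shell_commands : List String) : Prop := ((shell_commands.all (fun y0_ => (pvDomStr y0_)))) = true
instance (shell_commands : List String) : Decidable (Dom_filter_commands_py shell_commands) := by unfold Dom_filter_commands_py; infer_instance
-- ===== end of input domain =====

-- B replaces A's sort-then-adjacent-neighbour pass with a direct "keep a command iff no
-- other distinct command extends it" comprehension over the distinct commands (objective: simpler).


-- ===== PORT A =====
-- one loop step: 'if not shell_commands[index+1].startswith(shell_commands[index]): filtered += [shell_commands[index]]'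
def pvStepA (sc : List String) (acc : List String) (index : Int) : List String :=
  if ¬ (PySem.Str.startswith (PySem.List.pyGetD sc (index + 1) "") (PySem.List.pyGetD sc index "") = true) then
    acc ++ [PySem.List.pyGetD sc index ""]
  else acc

def filter_commands_py (shell_commands : List String) : List String :=
  if shell_commands.length ≠ 0 then
    let sc := PySem.List.sorted shell_commands (fun x => x)
    let filtered := (PySem.List.pyRange 0 ((sc.length : Int) - 1) 1).foldl (pvStepA sc) []
    PySem.Set.ofList (filtered ++ [PySem.List.pyGetD sc (-1) ""])
  else
    PySem.Set.ofList []

-- ===== PORT B =====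
def filter_commands_py_alt (shell_commands : List String) : List String :=
  let commands := PySem.List.sorted (PySem.Set.ofList shell_commands) (fun x => x)
  PySem.Set.ofList (commands.filter (fun c =>
    ! commands.any (fun d => d != c && PySem.Str.startswith d c)))

-- ===== PRECONDITION & SPEC =====
def Spec_filter_commands_py (shell_commands : List String) (out : List String) : Prop := out = filter_commands_py_alt shell_commands
instance (shell_commands : List String) (out : List String) : Decidable (Spec_filter_commands_py shell_commands out) := by unfold Spec_filter_commands_py; infer_instance

-- ===== CLAIM (what is proved, stated in full; the proofs are below) =====
def Claim_equal_filter_commands_py : Prop := ∀ (shell_commands : List String), Dom_filter_commands_py shell_commands → Spec_filter_commands_py shell_commands (filter_commands_py shell_commands)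

-- ===== LEMMAS AND PROOFS =====

-- A's adjacent-neighbour pass (including the final 'filtered += [shell_commands[-1]]'),
-- written as a structural recursion for the proof.
def pvAdj : List String → List String
  | [] => []
  | [x] => [x]
  | x :: y :: r => if PySem.Str.startswith y x then pvAdj (y :: r) else x :: pvAdj (y :: r)

-- the keep-condition both programs realise: no OTHER listed command extends c
def pvKeep (m : List String) (c : String) : Prop :=
  ∀ d ∈ m, d = c ∨ ¬ (PySem.Str.startswith d c = true)

-- startswith is list-prefix
theorem pv_startswith_iff (s p : String) :
    PySem.Str.startswith s p = true ↔ p.toList <+: s.toList := by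
  simp [PySem.Str.startswith, PySem.Chars.startswith]

-- nothing is lexicographically below its own prefix
theorem pv_not_lex_of_prefix {u w : List Char} (h : u <+: w) :
    ¬ List.Lex (· < ·) w u := by
  induction u generalizing w with
  | nil => intro hx; cases hx
  | cons a u ih =>
    obtain ⟨t, rfl⟩ := h
    intro hx
    cases hx with
    | rel hr => exact lt_irrefl _ hr
    | cons hx => exact ih ⟨t, rfl⟩ hx

theorem pv_le_of_startswith {a b : String} (h : PySem.Str.startswith a b = true) : b ≤ a := by
  rw [pv_startswith_iff] at h
  by_contra hlt
  push Not at hlt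
  exact pv_not_lex_of_prefix h (String.lt_iff_toList_lt.mp hlt)

-- contiguity of the prefix block in lexicographic order
theorem pv_lex_of_prefix_of_lex {u v w : List Char}
    (h : List.Lex (· < ·) u v) (hnp : ¬ u <+: v) (hp : u <+: w) :
    List.Lex (· < ·) w v := by
  induction h generalizing w with
  | nil => exact absurd (List.nil_prefix) hnp
  | @rel a l₁ b l₂ hab =>
    obtain ⟨t, rfl⟩ := hp
    exact List.Lex.rel hab
  | @cons a l₁ l₂ h ih =>
    obtain ⟨t, rfl⟩ := hp
    refine List.Lex.cons (ih (fun hpre => hnp ?_) ⟨t, rfl⟩)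
    exact (List.cons_prefix_cons).mpr ⟨rfl, hpre⟩

-- if y does not extend x but d does, and x ≤ y, then d < y
theorem pv_lt_of_startswith {x y d : String} (hxy : x ≤ y)
    (hy : ¬ PySem.Str.startswith y x = true) (hd : PySem.Str.startswith d x = true) : d < y := by
  have hxy' : x < y := lt_of_le_of_ne hxy (by
    rintro rfl
    exact hy ((pv_startswith_iff _ _).mpr (List.prefix_refl _)))
  rw [pv_startswith_iff] at hy hd
  rw [String.lt_iff_toList_lt] at hxy' ⊢
  exact pv_lex_of_prefix_of_lex hxy' hy hd

-- characterisation of the adjacent pass on a sorted list: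
-- strictly increasing output, containing exactly the kept commands
theorem pv_adj_char (m : List String) (hs : m.Pairwise (· ≤ ·)) :
    (pvAdj m).Pairwise (· < ·) ∧ ∀ c, c ∈ pvAdj m ↔ c ∈ m ∧ pvKeep m c := by
  induction m with
  | nil => simp [pvAdj, pvKeep]
  | cons x t ih =>
    cases t with
    | nil =>
      constructor
      · simp [pvAdj]
      · intro c
        simp only [pvAdj, pvKeep, List.mem_cons, List.not_mem_nil, or_false]
        constructor
        · rintro rfl; exact ⟨rfl, fun d hd => by rw [show d = c from hd]; exact Or.inl rfl⟩
        · rintro ⟨rfl, -⟩; rfl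
    | cons y r =>
      have hxy : x ≤ y := (List.pairwise_cons.mp hs).1 y (List.mem_cons_self ..)
      have hxt : ∀ d ∈ y :: r, x ≤ d := (List.pairwise_cons.mp hs).1
      have hst : (y :: r).Pairwise (· ≤ ·) := (List.pairwise_cons.mp hs).2
      have hyr : ∀ d ∈ r, y ≤ d := (List.pairwise_cons.mp hst).1
      obtain ⟨ihp, ihm⟩ := ih hst
      by_cases hsw : PySem.Str.startswith y x = true
      · -- x is a prefix of y: the pass drops x
        have hun : pvAdj (x :: y :: r) = pvAdj (y :: r) := by rw [pvAdj, if_pos hsw]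
        rw [hun]
        refine ⟨ihp, fun c => ?_⟩
        rw [ihm c]
        constructor
        · rintro ⟨hc, hk⟩
          refine ⟨List.mem_cons_of_mem _ hc, fun d hd => ?_⟩
          rcases List.mem_cons.mp hd with rfl | hd'
          · -- d = x: if c were a proper prefix of x it would be one of y too
            by_contra hcon
            push Not at hcon
            obtain ⟨hne, hpx⟩ := hcon
            have hpy : PySem.Str.startswith y c = true := by
              rw [pv_startswith_iff] at hpx hsw ⊢
              exact hpx.trans hsw
            have hlen : c.toList.length < d.toList.length := by
              rw [pv_startswith_iff] at hpx
              rcases lt_or_eq_of_le hpx.length_le with h | h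
              · exact h
              · exact absurd (String.ext (List.IsPrefix.eq_of_length hpx h)) (fun e => hne e.symm)
            have hney : y ≠ c := by
              rw [pv_startswith_iff] at hsw
              intro e
              have h1 : d.toList.length ≤ y.toList.length := hsw.length_le
              rw [e] at h1
              omega
            rcases hk y (List.mem_cons_self ..) with h | hny
            · exact hney h
            · exact hny hpy
          · exact hk d hd'
        · rintro ⟨hc, hk⟩
          rcases List.mem_cons.mp hc with rfl | hc'
          · rcases hk y (List.mem_cons_of_mem _ (List.mem_cons_self ..)) with rfl | hny
            · exact ⟨List.mem_cons_self .., fun d hd => hk d (List.mem_cons_of_mem _ hd)⟩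
            · exact absurd hsw hny
          · exact ⟨hc', fun d hd => hk d (List.mem_cons_of_mem _ hd)⟩
      · -- y does not extend x: the pass keeps x
        have hun : pvAdj (x :: y :: r) = x :: pvAdj (y :: r) := by rw [pvAdj, if_neg hsw]
        rw [hun]
        have hxne : x ≠ y := by
          rintro rfl; exact hsw ((pv_startswith_iff _ _).mpr (List.prefix_refl _))
        have hsub : ∀ c ∈ pvAdj (y :: r), c ∈ y :: r := fun c hc => ((ihm c).mp hc).1
        have hxlt : ∀ c ∈ pvAdj (y :: r), x < c := by
          intro c hc
          rcases List.mem_cons.mp (hsub c hc) with rfl | hcr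
          · exact lt_of_le_of_ne hxy hxne
          · exact lt_of_lt_of_le (lt_of_le_of_ne hxy hxne) (hyr c hcr)
        refine ⟨List.pairwise_cons.mpr ⟨hxlt, ihp⟩, fun c => ?_⟩
        rw [List.mem_cons, ihm c]
        constructor
        · rintro (rfl | ⟨hc, hk⟩)
          · refine ⟨List.mem_cons_self .., fun d hd => ?_⟩
            rcases List.mem_cons.mp hd with rfl | hd'
            · exact Or.inl rfl
            · rcases List.mem_cons.mp hd' with rfl | hdr
              · exact Or.inr hsw
              · refine Or.inr fun hpd => ?_
                exact absurd (lt_of_lt_of_le (pv_lt_of_startswith hxy hsw hpd) (hyr d hdr))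
                  (lt_irrefl d)
          · refine ⟨List.mem_cons_of_mem _ hc, fun d hd => ?_⟩
            rcases List.mem_cons.mp hd with rfl | hd'
            · by_contra hcon
              push Not at hcon
              obtain ⟨hne, hpx⟩ := hcon
              exact hne (le_antisymm (hxt c hc) (pv_le_of_startswith hpx))
            · exact hk d hd'
        · rintro ⟨hc, hk⟩
          rcases List.mem_cons.mp hc with rfl | hc'
          · exact Or.inl rfl
          · exact Or.inr ⟨hc', fun d hd => hk d (List.mem_cons_of_mem _ hd)⟩

-- A's foldl over indices is the structural pass pvAdj
theorem pv_fold_eq_adj (sc : List String) (h : sc ≠ []) (acc : List String) :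
    ((List.range (sc.length - 1)).foldl
      (fun a k => if ¬ (PySem.Str.startswith (sc.getD (k+1) "") (sc.getD k "") = true)
                  then a ++ [sc.getD k ""] else a) acc) ++ [sc.getLast h] =
    acc ++ pvAdj sc := by
  induction sc generalizing acc with
  | nil => exact absurd rfl h
  | cons x t ih =>
    cases t with
    | nil => simp [pvAdj]
    | cons y r =>
      have hlen : (x :: y :: r).length - 1 = ((y :: r).length - 1) + 1 := by simp
      rw [hlen, List.range_succ_eq_map, List.foldl_cons, List.foldl_map]
      have hstep : ∀ (a : List String) (k : Nat),
          (fun a k => if ¬ (PySem.Str.startswith ((x :: y :: r).getD (k+1) "") ((x :: y :: r).getD k "") = true)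
                      then a ++ [(x :: y :: r).getD k ""] else a) a (k+1)
          = (fun a k => if ¬ (PySem.Str.startswith ((y :: r).getD (k+1) "") ((y :: r).getD k "") = true)
                      then a ++ [(y :: r).getD k ""] else a) a k := by
        intro a k; simp
      have hfold : ∀ (a : List String),
          (List.range ((y :: r).length - 1)).foldl
            (fun a k => (fun a k => if ¬ (PySem.Str.startswith ((x :: y :: r).getD (k+1) "") ((x :: y :: r).getD k "") = true)
                      then a ++ [(x :: y :: r).getD k ""] else a) a (k+1)) a
          = (List.range ((y :: r).length - 1)).foldl
            (fun a k => if ¬ (PySem.Str.startswith ((y :: r).getD (k+1) "") ((y :: r).getD k "") = true)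
                      then a ++ [(y :: r).getD k ""] else a) a := by
        intro a
        exact List.foldl_ext _ _ a (fun a k _ => hstep a k)
      simp only [Nat.succ_eq_add_one]
      rw [hfold]
      have hlast : (x :: y :: r).getLast h = (y :: r).getLast (by simp) := by
        simp [List.getLast_cons]
      rw [hlast, ih (by simp)]
      simp only [PySem.Str.startswith] at *
      by_cases hsw : PySem.Chars.startswith y.toList x.toList = true
      · simp [pvAdj, PySem.Str.startswith, hsw]
      · simp [pvAdj, PySem.Str.startswith, hsw]

-- two strictly increasing lists with the same members are equal
theorem pv_eq_of_pairwise_lt {l₁ l₂ : List String}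
    (h₁ : l₁.Pairwise (· < ·)) (h₂ : l₂.Pairwise (· < ·))
    (hm : ∀ a, a ∈ l₁ ↔ a ∈ l₂) : l₁ = l₂ := by
  have n₁ : l₁.Nodup := h₁.imp (fun h => ne_of_lt h)
  have n₂ : l₂.Nodup := h₂.imp (fun h => ne_of_lt h)
  exact List.Perm.eq_of_pairwise
    (fun a b _ _ hab hba => absurd hba (lt_asymm hab)) h₁ h₂
    ((List.perm_ext_iff_of_nodup n₁ n₂).mpr hm)

theorem pv_final (L : List String) : filter_commands_py L = filter_commands_py_alt L := by
  by_cases hL : L = []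
  · subst hL; rfl
  · have hlen : L.length ≠ 0 := by simpa using hL
    set sc := PySem.List.sorted L (fun x => x) with hsc
    have hscne : sc ≠ [] := by
      intro h
      exact hL ((PySem.List.sorted_eq_nil_iff L (fun x => x) false).mp h)
    have hmemsc : ∀ c, c ∈ sc ↔ c ∈ L := fun c => (PySem.List.sorted_perm L (fun x => x) false).mem_iff
    have hsorted : sc.Pairwise (· ≤ ·) := PySem.List.sorted_pairwise L (fun x => x)
    obtain ⟨hadjlt, hadjmem⟩ := pv_adj_char sc hsorted
    -- A's value is pvAdj sc
    have hA : filter_commands_py L = pvAdj sc := by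
      rw [filter_commands_py, if_pos hlen]
      simp only [← hsc]
      rw [PySem.List.pyRange_one]
      simp only [List.foldl_map]
      have hN : (((sc.length : Int) - 1 - 0)).toNat = sc.length - 1 := by omega
      rw [hN]
      have hstep : ∀ (a : List String), ∀ k ∈ List.range (sc.length - 1),
          pvStepA sc a ((0 : Int) + (k : Int))
          = (fun a k => if ¬ (PySem.Str.startswith (sc.getD (k+1) "") (sc.getD k "") = true)
                        then a ++ [sc.getD k ""] else a) a k := by
        intro a k _
        simp only [pvStepA, zero_add]
        have h1 : ((k : Int) + 1) = ((k + 1 : Nat) : Int) := by push_cast; ring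
        rw [h1, PySem.List.pyGetD_natCast, PySem.List.pyGetD_natCast]
      rw [List.foldl_ext _ _ [] hstep]
      rw [PySem.List.pyGetD_neg_one sc "" hscne]
      rw [pv_fold_eq_adj sc hscne []]
      rw [List.nil_append]
      exact PySem.Set.ofList_eq_self_of_nodup _ (hadjlt.imp (fun h => ne_of_lt h))
    rw [hA]
    -- B's value is the filter over the strictly increasing distinct commands
    set sB := PySem.List.sorted (PySem.Set.ofList L) (fun x => x) with hsB
    have hBlt : sB.Pairwise (· < ·) := PySem.List.sorted_ofList_pairwise_lt L
    have hmemsB : ∀ c, c ∈ sB ↔ c ∈ L := by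
      intro c
      rw [hsB, PySem.List.mem_sorted, PySem.Set.mem_ofList]
    have hfiltlt : (sB.filter (fun c => ! sB.any (fun d => d != c && PySem.Str.startswith d c))).Pairwise (· < ·) :=
      hBlt.filter _
    have hB : filter_commands_py_alt L
        = sB.filter (fun c => ! sB.any (fun d => d != c && PySem.Str.startswith d c)) := by
      rw [filter_commands_py_alt]
      simp only [← hsB]
      exact PySem.Set.ofList_eq_self_of_nodup _ (hfiltlt.imp (fun h => ne_of_lt h))
    rw [hB]
    apply pv_eq_of_pairwise_lt hadjlt hfiltlt
    intro c
    rw [hadjmem c, List.mem_filter]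
    have hkeep : (! sB.any (fun d => d != c && PySem.Str.startswith d c)) = true ↔ pvKeep sB c := by
      simp [pvKeep]
      constructor
      · intro h d hd
        by_cases e : d = c
        · exact Or.inl e
        · exact Or.inr (h d hd e)
      · intro h d hd hne
        rcases h d hd with e | hf
        · exact absurd e hne
        · exact hf
    constructor
    · rintro ⟨hc, hk⟩
      refine ⟨(hmemsB c).mpr ((hmemsc c).mp hc), hkeep.mpr ?_⟩
      intro d hd
      exact hk d ((hmemsc d).mpr ((hmemsB d).mp hd))
    · rintro ⟨hc, hk⟩
      refine ⟨(hmemsc c).mpr ((hmemsB c).mp hc), ?_⟩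
      intro d hd
      exact hkeep.mp hk d ((hmemsB d).mpr ((hmemsc d).mp hd))

-- ===== VERDICT (by name: the statement is the Claim_ definition above) =====
theorem filter_commands_py_spec : Claim_equal_filter_commands_py := by
  intro shell_commands _
  unfold Spec_filter_commands_py
  exact pv_final shell_commands
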